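-- pv_equiv track=rewrite | github.com/mosharafhossain/negation-mt | negation_cue/evaluation.py | get_num_cues
-- ===== SOURCE A (Python) =====
-- def get_num_cues(pred_sent):
--     num_cues = 0
--     visited = False
--     for i in range(len(pred_sent)):
--         if pred_sent[i] in ('S_C', 'PRE_C', 'POST_C'):
--             num_cues = num_cues+1
--         elif pred_sent[i] == "M_C" and visited == False:
--             num_cues = num_cues+1
--             visited = True
--     return num_cues
-- ===== SOURCE B (Python) =====
-- def get_num_cues(pred_sent):
--     base = sum(1 for x in pred_sent if x in ('S_C', 'PRE_C', 'POST_C'))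
--     return base + (1 if 'M_C' in pred_sent else 0)
-- ===== Notes on version B (the rewrite author's own statement) =====
-- stated objective: simpler
-- what changed: Removed the stateful visited-flag loop: B counts the single-word cue labels with a sum and adds 1 via a separate membership check for 'M_C', since the never-reset flag makes M_C contribute exactly once iff it occurs anywhere.
import Mathlib
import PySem

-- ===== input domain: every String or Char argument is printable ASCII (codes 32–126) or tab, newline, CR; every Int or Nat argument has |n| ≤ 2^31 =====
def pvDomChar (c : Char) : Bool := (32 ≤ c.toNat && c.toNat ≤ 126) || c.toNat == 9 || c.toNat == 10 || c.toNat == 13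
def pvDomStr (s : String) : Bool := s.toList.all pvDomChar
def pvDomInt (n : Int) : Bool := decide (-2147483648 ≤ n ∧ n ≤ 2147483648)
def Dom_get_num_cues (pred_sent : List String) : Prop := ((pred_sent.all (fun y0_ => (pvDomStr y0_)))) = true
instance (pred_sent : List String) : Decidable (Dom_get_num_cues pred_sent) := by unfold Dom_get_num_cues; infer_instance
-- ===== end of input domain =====

-- B replaces A's stateful visited-flag loop by a count of the single-word cue labels plus a separate membership check for "M_C" (objective: simpler).

-- ===== PORT A =====
-- A's loop body: the pair state (num_cues, visited), branches in A's order.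
def getNumCuesStep (s : Int × Bool) (x : String) : Int × Bool :=
  if x = "S_C" ∨ x = "PRE_C" ∨ x = "POST_C" then (s.1 + 1, s.2)
  else if x = "M_C" ∧ s.2 = false then (s.1 + 1, true)
  else s

def get_num_cues (pred_sent : List String) : Int :=
  (pred_sent.foldl getNumCuesStep (0, false)).1

-- ===== PORT B =====
def get_num_cues_alt (pred_sent : List String) : Int :=
  (pred_sent.countP (fun x => decide (x = "S_C" ∨ x = "PRE_C" ∨ x = "POST_C")) : Int)
  + (if "M_C" ∈ pred_sent then 1 else 0)

-- ===== PRECONDITION & SPEC =====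
def Spec_get_num_cues (pred_sent : List String) (out : Int) : Prop := out = get_num_cues_alt pred_sent
instance (pred_sent : List String) (out : Int) : Decidable (Spec_get_num_cues pred_sent out) := by unfold Spec_get_num_cues; infer_instance

-- ===== CLAIM (what is proved, stated in full; the proofs are below) =====
def Claim_equal_get_num_cues : Prop := ∀ (pred_sent : List String), Dom_get_num_cues pred_sent → Spec_get_num_cues pred_sent (get_num_cues pred_sent)

-- ===== LEMMAS AND PROOFS =====
lemma getNumCues_loop (l : List String) (n : Int) (v : Bool) :
    (l.foldl getNumCuesStep (n, v)).1 =
      n + (l.countP (fun x => decide (x = "S_C" ∨ x = "PRE_C" ∨ x = "POST_C")) : Int)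
        + (if v = false ∧ "M_C" ∈ l then 1 else 0) := by
  induction l generalizing n v with
  | nil => simp
  | cons x xs ih =>
    simp only [List.foldl_cons, List.countP_cons, getNumCuesStep]
    by_cases h1 : x = "S_C" ∨ x = "PRE_C" ∨ x = "POST_C"
    · have hx : "M_C" ≠ x := by rcases h1 with h | h | h <;> simp [h]
      simp [h1, ih, hx]
      ring
    · by_cases h2 : x = "M_C" ∧ v = false
      · simp [h2.1, h2.2, ih]; ring
      · rw [if_neg h1, if_neg h2, ih]
        simp only [h1, decide_eq_true_eq, List.mem_cons]
        have : ¬ (v = false ∧ x = "M_C") := fun ⟨hv, hx⟩ => h2 ⟨hx, hv⟩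
        by_cases hv : v = false
        · have hx : "M_C" ≠ x := fun hx => this ⟨hv, hx.symm⟩
          simp [hv, hx]
        · simp [hv]

-- ===== VERDICT (by name: the statement is the Claim_ definition above) =====
theorem get_num_cues_spec : Claim_equal_get_num_cues := by
  intro l _
  unfold Spec_get_num_cues get_num_cues get_num_cues_alt
  rw [getNumCues_loop]
  simp
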